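-- pv_equiv track=rewrite | github.com/katoshinyu/iLSB_Problem_Server | ProblemPython/ProblemDataProcess.py | InclusionJudge
-- ===== SOURCE A (Python) =====
-- def InclusionJudge(parent_list, title_list, nowID):
--         InKey_list = list()
--         count = 0 #parentとtitleの配列の要素を照らし合わせるためのカウンター
--         for InKey in parent_list:
--                 if InKey == parent_list[nowID]:
--                         if title_list[count] == title_list[nowID]:
--                                 count += 1
--                                 continue
--                         InKey_list.append(title_list[nowID])
--                         count += 1
--                 else:
--                         count += 1
--
--         return InKey_list
-- ===== SOURCE B (Python) =====
-- def InclusionJudge(parent_list, title_list, nowID):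
--     if not parent_list:
--         return []
--     target_parent = parent_list[nowID]
--     target_title = title_list[nowID]
--     # titles of all entries sharing the target's parent (lockstep pairing)
--     sibling_titles = [t for p, t in zip(parent_list, title_list) if p == target_parent]
--     # mismatched siblings = all siblings minus those with the same title
--     return [target_title] * (len(sibling_titles) - sibling_titles.count(target_title))
-- ===== Notes on version B (the rewrite author's own statement) =====
-- stated objective: simpler
-- what changed: Instead of A's indexed single pass that tests each element's title for mismatch and appends, B first collects the sibling titles by filtering a zip of the two lists, then obtains the answer by complement arithmetic (len(siblings) - siblings.count(target_title)) and list replication; the mismatch test of A never appears.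
import Mathlib
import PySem

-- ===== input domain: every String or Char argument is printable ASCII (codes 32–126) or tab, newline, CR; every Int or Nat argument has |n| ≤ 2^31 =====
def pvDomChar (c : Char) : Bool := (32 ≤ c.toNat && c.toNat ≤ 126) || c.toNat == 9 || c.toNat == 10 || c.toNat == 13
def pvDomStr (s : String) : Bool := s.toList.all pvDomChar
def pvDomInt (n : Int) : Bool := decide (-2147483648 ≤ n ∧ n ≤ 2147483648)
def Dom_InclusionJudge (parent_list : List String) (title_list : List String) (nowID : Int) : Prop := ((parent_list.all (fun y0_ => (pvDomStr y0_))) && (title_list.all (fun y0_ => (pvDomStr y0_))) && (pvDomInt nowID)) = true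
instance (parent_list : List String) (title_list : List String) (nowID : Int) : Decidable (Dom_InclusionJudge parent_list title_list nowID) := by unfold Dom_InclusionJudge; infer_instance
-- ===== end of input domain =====

-- B replaces A's indexed pass with conditional appends by filtering sibling titles from a zip and
-- complement arithmetic (total siblings minus same-title siblings), then replication (objective: simpler).

-- ===== PORT A =====
def InclusionJudge (parent_list : List String) (title_list : List String) (nowID : Int) : List String :=
  (parent_list.foldl (fun (st : List String × Int) inKey =>
      if inKey == PySem.List.pyGetD parent_list nowID "" then
        if PySem.List.pyGetD title_list st.2 "" == PySem.List.pyGetD title_list nowID "" then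
          (st.1, st.2 + 1)
        else
          (st.1 ++ [PySem.List.pyGetD title_list nowID ""], st.2 + 1)
      else
        (st.1, st.2 + 1)) (([] : List String), (0 : Int))).1

-- ===== PORT B =====
def InclusionJudge_alt (parent_list : List String) (title_list : List String) (nowID : Int) : List String :=
  if parent_list = [] then []
  else
    let targetParent := PySem.List.pyGetD parent_list nowID ""
    let targetTitle := PySem.List.pyGetD title_list nowID ""
    let siblingTitles := ((parent_list.zip title_list).filter (fun pt => pt.1 == targetParent)).map Prod.snd
    List.replicate (siblingTitles.length - siblingTitles.count targetTitle) targetTitle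

-- ===== PRECONDITION & SPEC =====
-- Pre_ excludes exactly the inputs where Python A raises IndexError: nonempty parent_list with
-- nowID out of (negative-index) range of parent_list or title_list, or a parent-matching index
-- that falls outside title_list.
def Pre_InclusionJudge (parent_list : List String) (title_list : List String) (nowID : Int) : Prop :=
  parent_list = [] ∨
    (PySem.Raise.InRange parent_list.length nowID ∧
     PySem.Raise.InRange title_list.length nowID ∧
     ∀ i, i < parent_list.length →
       parent_list.getD i "" = PySem.List.pyGetD parent_list nowID "" → i < title_list.length)

instance (parent_list : List String) (title_list : List String) (nowID : Int) : Decidable (Pre_InclusionJudge parent_list title_list nowID) := by unfold Pre_InclusionJudge; infer_instance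

def pvWitness_InclusionJudge : List String × List String × Int := (["a", "b", "a"], ["x", "y", "z"], 0)

def Spec_InclusionJudge (parent_list : List String) (title_list : List String) (nowID : Int) (out : List String) : Prop := out = InclusionJudge_alt parent_list title_list nowID
instance (parent_list : List String) (title_list : List String) (nowID : Int) (out : List String) : Decidable (Spec_InclusionJudge parent_list title_list nowID out) := by unfold Spec_InclusionJudge; infer_instance

-- ===== CLAIM (what is proved, stated in full; the proofs are below) =====
def Claim_equal_InclusionJudge : Prop := ∀ (parent_list : List String) (title_list : List String) (nowID : Int), Dom_InclusionJudge parent_list title_list nowID → Pre_InclusionJudge parent_list title_list nowID → Spec_InclusionJudge parent_list title_list nowID (InclusionJudge parent_list title_list nowID)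

-- ===== LEMMAS AND PROOFS =====

-- number of indices (walking ys structurally, with running title index c) whose parent matches p
-- and whose title (looked up in tl at c) differs from t: the content of A's loop
def cntMis (p t : String) (tl : List String) : List String → Int → Nat
  | [], _ => 0
  | y :: ys, c =>
      (if y == p && !(PySem.List.pyGetD tl c "" == t) then 1 else 0) + cntMis p t tl ys (c + 1)

-- same count, with the remaining title list carried structurally instead of an index
def cntMis2 (p t : String) : List String → List String → Nat
  | [], _ => 0
  | y :: ys, ts =>
      (if y == p && !(ts.getD 0 "" == t) then 1 else 0) + cntMis2 p t ys (ts.drop 1)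

-- same count, over a zipped pair list (B's data layout)
def cntZip (p t : String) : List (String × String) → Nat
  | [] => 0
  | pt :: zs => (if pt.1 == p && !(pt.2 == t) then 1 else 0) + cntZip p t zs

lemma afold_eq (p t : String) (tl : List String) (ys : List String) (acc : List String) (c : Int) :
    ys.foldl (fun (st : List String × Int) inKey =>
      if inKey == p then
        if PySem.List.pyGetD tl st.2 "" == t then (st.1, st.2 + 1)
        else (st.1 ++ [t], st.2 + 1)
      else (st.1, st.2 + 1)) (acc, c)
    = (acc ++ List.replicate (cntMis p t tl ys c) t, c + ys.length) := by
  induction ys generalizing acc c with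
  | nil => simp [cntMis]
  | cons y ys ih =>
      simp only [List.foldl_cons]
      by_cases hp : (y == p) = true
      · by_cases ht : (PySem.List.pyGetD tl c "" == t) = true
        · rw [if_pos hp, if_pos ht, ih]
          simp [cntMis, hp, ht]
          omega
        · rw [if_pos hp, if_neg (by simp [ht]), ih]
          simp [cntMis, hp, ht, List.append_assoc]
          exact ⟨by rw [Nat.one_add, List.replicate_succ], by omega⟩
      · rw [if_neg (by simp [hp]), ih]
        simp [cntMis, hp]
        omega

lemma cntMis_eq_cntMis2 (p t : String) (tl : List String) :
    ∀ (ys : List String) (n : Nat), cntMis p t tl ys (n : Int) = cntMis2 p t ys (tl.drop n) := by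
  intro ys
  induction ys with
  | nil => intro n; simp [cntMis, cntMis2]
  | cons y ys ih =>
      intro n
      have hget : PySem.List.pyGetD tl (n : Int) "" = (tl.drop n).getD 0 "" := by
        simp [PySem.List.pyGetD_natCast, List.getD_eq_getElem?_getD, List.getElem?_drop]
      have hdrop : (tl.drop n).drop 1 = tl.drop (n + 1) := by
        rw [List.drop_drop]
      have hc : (n : Int) + 1 = ((n + 1 : Nat) : Int) := by push_cast; ring
      simp only [cntMis, cntMis2, hget, hc, ih (n + 1), hdrop]

lemma cntMis2_eq_cntZip (p t : String) :
    ∀ (ys ts : List String),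
      (∀ i, i < ys.length → ys.getD i "" = p → i < ts.length) →
      cntMis2 p t ys ts = cntZip p t (ys.zip ts) := by
  intro ys
  induction ys with
  | nil => intro ts _; simp [cntMis2, cntZip]
  | cons y ys ih =>
      intro ts h
      cases ts with
      | nil =>
          have hy : (y == p) = false := by
            by_contra hne
            have : y = p := by
              have := eq_of_beq (Bool.of_not_eq_false hne)
              exact this
            exact absurd (h 0 (by simp) (by simpa using this)) (by simp)
          have hrec := ih [] (fun i hi hp => absurd (h (i + 1) (by simpa using Nat.succ_lt_succ hi) (by simpa using hp)) (by simp))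
          simp [cntMis2, cntZip, hy, hrec]
      | cons t' ts' =>
          have hrec := ih ts' (fun i hi hp => by
            have := h (i + 1) (by simpa using Nat.succ_lt_succ hi) (by simpa using hp)
            simpa using Nat.lt_of_succ_lt_succ (by simpa using this))
          simp [cntMis2, cntZip, hrec]

lemma sib_eq (p t : String) :
    ∀ (zs : List (String × String)),
      ((zs.filter (fun pt => pt.1 == p)).map Prod.snd).length
        - ((zs.filter (fun pt => pt.1 == p)).map Prod.snd).count t = cntZip p t zs := by
  intro zs
  induction zs with
  | nil => simp [cntZip]
  | cons pt zs ih =>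
      by_cases hp : (pt.1 == p) = true
      · have hfil : (pt :: zs).filter (fun q => q.1 == p) = pt :: zs.filter (fun q => q.1 == p) := by
          simp [hp]
        have hle : ((zs.filter (fun pt => pt.1 == p)).map Prod.snd).count t
            ≤ ((zs.filter (fun pt => pt.1 == p)).map Prod.snd).length := List.count_le_length
        rw [hfil]
        simp only [List.map_cons, List.length_cons, List.count_cons, cntZip, hp, Bool.true_and]
        by_cases ht : (pt.2 == t) = true
        · rw [if_pos ht, if_neg (by simp [ht])]
          omega
        · have hf : (pt.2 == t) = false := eq_false_of_ne_true ht
          rw [if_neg ht, if_pos (by simp [hf])]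
          omega
      · have hfil : (pt :: zs).filter (fun q => q.1 == p) = zs.filter (fun q => q.1 == p) := by
          simp [hp]
        rw [hfil, show cntZip p t (pt :: zs) = cntZip p t zs from by simp [cntZip, hp]]
        exact ih

theorem InclusionJudge_spec : Claim_equal_InclusionJudge := by
  intro pl tl nowID _ hpre
  unfold Spec_InclusionJudge InclusionJudge InclusionJudge_alt
  by_cases hpl : pl = []
  · subst hpl; simp
  · rw [if_neg hpl]
    rcases hpre with hpre | ⟨_, _, hidx⟩
    · exact absurd hpre hpl
    · rw [afold_eq (PySem.List.pyGetD pl nowID "") (PySem.List.pyGetD tl nowID "") tl pl [] 0]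
      simp only [List.nil_append]
      have h0 : cntMis (PySem.List.pyGetD pl nowID "") (PySem.List.pyGetD tl nowID "") tl pl 0
          = cntMis2 (PySem.List.pyGetD pl nowID "") (PySem.List.pyGetD tl nowID "") pl tl := by
        have := cntMis_eq_cntMis2 (PySem.List.pyGetD pl nowID "") (PySem.List.pyGetD tl nowID "") tl pl 0
        simpa using this
      rw [h0, cntMis2_eq_cntZip _ _ pl tl hidx, ← sib_eq]
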